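-- pv_equiv track=rewrite | github.com/bha411/EMOS | videotester (1).py | can_defeat_all
-- ===== SOURCE A (Python) =====
-- def can_defeat_all(N, H, A, X):
--     for j in range(N):
--         if A[j] <= X:
--             continue
--         elif H > A[j]:
--             H -= A[j]
--         else:
--             return False
--     return True
-- ===== SOURCE B (Python) =====
-- def can_defeat_all(N, H, A, X):
--     # stage 1: which enemies are actually fought
--     fighters = [A[j] for j in range(N) if A[j] > X]
--     # stage 2: cumulative damage after each fight
--     sums = []
--     s = 0
--     for a in fighters:
--         s += a
--         sums.append(s)
--     # stage 3: survive iff health strictly exceeds every cumulative damage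
--     return all(v < H for v in sums)
-- ===== Notes on version B (the rewrite author's own statement) =====
-- stated objective: alternative
-- what changed: B replaces A's single mutating loop with early return by three stages: filter the fought enemies, materialize the list of cumulative-damage prefix sums, then check all(prefix < H) with no early exit and no health mutation; Pre_ excludes N > len(A), where A raises IndexError unless an earlier enemy already forces False.
-- outside the precondition, e.g. on can_defeat_all(3, 5, [10], 0): A returns False, B raises IndexError
import Mathlib
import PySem

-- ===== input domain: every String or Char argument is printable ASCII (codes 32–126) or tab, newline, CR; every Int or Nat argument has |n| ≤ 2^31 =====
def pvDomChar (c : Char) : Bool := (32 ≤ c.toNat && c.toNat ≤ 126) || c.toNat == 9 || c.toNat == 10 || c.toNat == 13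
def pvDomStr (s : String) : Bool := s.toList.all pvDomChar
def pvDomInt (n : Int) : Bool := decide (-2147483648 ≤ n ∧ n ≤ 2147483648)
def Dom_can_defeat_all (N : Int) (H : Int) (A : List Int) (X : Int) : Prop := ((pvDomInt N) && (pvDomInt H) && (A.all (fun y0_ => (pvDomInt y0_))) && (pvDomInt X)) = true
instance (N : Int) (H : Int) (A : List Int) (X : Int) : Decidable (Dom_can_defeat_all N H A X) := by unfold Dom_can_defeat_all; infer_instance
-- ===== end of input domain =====

-- B replaces A's single mutating loop with early return by three staged passes:
-- filter fought enemies, build the list of cumulative-damage prefix sums, check all < H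
-- (alternative decomposition; same cost).

-- ===== PORT A =====
-- loop of A: `for j in range(N)` reads A[0..N-1] in order; ported as a walk of the list with a
-- countdown of N.toNat = len(range(N)) steps, carrying the current health H.  The case where the
-- list runs out before the countdown (Python's IndexError) is excluded by Pre_; the port returns
-- true there.
def canA_loop (X : Int) : Nat → List Int → Int → Bool
  | 0, _, _ => true
  | _ + 1, [], _ => true
  | n + 1, a :: rest, H =>
    if a ≤ X then canA_loop X n rest H
    else if H > a then canA_loop X n rest (H - a)
    else false

def can_defeat_all (N : Int) (H : Int) (A : List Int) (X : Int) : Bool :=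
  canA_loop X N.toNat A H

-- ===== PORT B =====
-- stage 1 of B: `[A[j] for j in range(N) if A[j] > X]`, same countdown convention as A's loop
def fightersB (X : Int) : Nat → List Int → List Int
  | 0, _ => []
  | _ + 1, [] => []
  | n + 1, a :: rest => if a > X then a :: fightersB X n rest else fightersB X n rest

-- stage 2 of B: the running-sum loop producing the list `sums` of cumulative damages
def sumsB (s : Int) : List Int → List Int
  | [] => []
  | a :: rest => (s + a) :: sumsB (s + a) rest

-- stage 3 of B: `all(v < H for v in sums)`
def can_defeat_all_alt (N : Int) (H : Int) (A : List Int) (X : Int) : Bool :=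
  (sumsB 0 (fightersB X N.toNat A)).all (fun v => decide (v < H))

-- ===== PRECONDITION & SPEC =====
-- Pre_ requires N ≤ len(A): for larger N the Python A indexes past the end and raises
-- IndexError unless it has already returned False at an earlier index.
def Pre_can_defeat_all (N : Int) (H : Int) (A : List Int) (X : Int) : Prop := N ≤ (A.length : Int)
instance (N : Int) (H : Int) (A : List Int) (X : Int) : Decidable (Pre_can_defeat_all N H A X) := by unfold Pre_can_defeat_all; infer_instance
def pvWitness_can_defeat_all : Int × Int × List Int × Int := (3, 10, [1, 5, 2], 1)

def Spec_can_defeat_all (N : Int) (H : Int) (A : List Int) (X : Int) (out : Bool) : Prop := out = can_defeat_all_alt N H A X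
instance (N : Int) (H : Int) (A : List Int) (X : Int) (out : Bool) : Decidable (Spec_can_defeat_all N H A X out) := by unfold Spec_can_defeat_all; infer_instance

-- ===== CLAIM (what is proved, stated in full; the proofs are below) =====
def Claim_equal_can_defeat_all : Prop := ∀ (N : Int) (H : Int) (A : List Int) (X : Int), Dom_can_defeat_all N H A X → Pre_can_defeat_all N H A X → Spec_can_defeat_all N H A X (can_defeat_all N H A X)

-- ===== LEMMAS AND PROOFS =====

-- invariant: with cumulative damage s already taken, A's remaining health is H - s, and A
-- survives the rest iff every further cumulative damage stays below H
theorem loop_eq (X : Int) (H : Int) : ∀ (n : Nat) (l : List Int) (s : Int),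
    canA_loop X n l (H - s) = (sumsB s (fightersB X n l)).all (fun v => decide (v < H)) := by
  intro n
  induction n with
  | zero => intro l s; rfl
  | succ n ih =>
    intro l s
    cases l with
    | nil => rfl
    | cons a rest =>
      simp only [canA_loop, fightersB]
      by_cases hax : a ≤ X
      · simp [hax, not_lt.mpr hax, ih]
      · simp only [if_neg hax, if_pos (lt_of_not_ge hax), sumsB, List.all_cons]
        by_cases hs : s + a < H
        · have h1 : H - s > a := by omega
          have h2 : H - s - a = H - (s + a) := by ring
          simp [h1, hs, h2, ih]
        · have h1 : ¬ H - s > a := by omega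
          simp [h1, hs]

-- ===== VERDICT (by name: the statement is the Claim_ definition above) =====
theorem can_defeat_all_spec : Claim_equal_can_defeat_all := by
  intro N H A X _ _
  unfold Spec_can_defeat_all can_defeat_all can_defeat_all_alt
  simpa using loop_eq X H N.toNat A 0
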